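-- pv_equiv track=rewrite | github.com/nrminor/SAM_Refiner | src/samrefiner/sam_parsing.py | get_combos
-- ===== SOURCE A (Python) =====
-- import itertools
--
-- def get_combos(qlist, clen):
--     """
--     Called to get combinations of cosegregating polymorphisms
--     Parameters:
--     qlist - list of polymorphisms
--     clen - number of polymorphisms to report together
--
--     Functionality:
--         uses itertools.combinations to get sets of combinations for each length
--     Returns list of combinations
--     """
--     combos = []
--     if clen == 0 or clen > len(qlist):
--         clen = len(qlist)
--     for N in range(1, clen + 1):
--         for comb in itertools.combinations(qlist, N):
--             combos.append(" ".join(comb))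
--     return combos
-- ===== SOURCE B (Python) =====
-- def get_combos(qlist, clen):
--     if clen == 0 or clen > len(qlist):
--         clen = len(qlist)
--     combos = []
--     if clen <= 0:
--         return combos
--     # DP over the elements (right to left): buckets[k] holds the joined
--     # size-(k+1) combinations of the suffix processed so far, in A's order.
--     # Only clen buckets are kept: larger sizes are never reported.
--     buckets = [[] for _ in range(clen)]
--     for x in reversed(qlist):
--         for k in range(clen - 1, 0, -1):
--             buckets[k][:0] = [x + " " + t for t in buckets[k - 1]]
--         buckets[0][:0] = [x]
--     for b in buckets:
--         combos.extend(b)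
--     return combos
-- ===== Notes on version B (the rewrite author's own statement) =====
-- stated objective: alternative
-- what changed: Replaces the per-size itertools.combinations passes with a single right-to-left dynamic-programming sweep that maintains one bucket of joined combination strings per size (only the clen sizes to be reported), extending every bucket as each element is processed, then concatenates the buckets.
import Mathlib
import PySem

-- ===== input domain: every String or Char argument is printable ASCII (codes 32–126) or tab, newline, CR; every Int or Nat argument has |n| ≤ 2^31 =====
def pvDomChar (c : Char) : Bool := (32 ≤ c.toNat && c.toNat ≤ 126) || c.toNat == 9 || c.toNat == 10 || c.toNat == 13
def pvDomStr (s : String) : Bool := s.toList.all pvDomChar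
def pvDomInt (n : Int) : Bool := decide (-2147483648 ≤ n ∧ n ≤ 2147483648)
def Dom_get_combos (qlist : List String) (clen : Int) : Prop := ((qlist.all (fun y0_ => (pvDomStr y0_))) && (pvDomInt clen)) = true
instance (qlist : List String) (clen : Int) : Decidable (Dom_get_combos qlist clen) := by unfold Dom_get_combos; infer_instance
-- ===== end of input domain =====

-- B replaces the per-size itertools.combinations passes with one right-to-left DP sweep
-- maintaining a bucket of joined strings per size; same order, same cost (objective: alternative).

-- ===== PORT A =====
-- itertools.combinations(xs, n) in Python's emission order (lexicographic by index)
def pvCombs : List String → Nat → List (List String)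
  | _, 0 => [[]]
  | [], _ + 1 => []
  | x :: rest, n + 1 => ((pvCombs rest n).map (fun l => x :: l)) ++ pvCombs rest (n + 1)

def get_combos (qlist : List String) (clen : Int) : List String :=
  let clen := if clen == 0 || clen > (qlist.length : Int) then (qlist.length : Int) else clen
  (PySem.List.pyRange 1 (clen + 1) 1).foldl
    (fun combos N =>
      (pvCombs qlist N.toNat).foldl (fun cs comb => cs ++ [PySem.Str.join " " comb]) combos)
    []

-- ===== PORT B =====
-- the inner 'for k in range(len(buckets)-1, 0, -1)' downward sweep of Source B:
-- buckets[k] := prefixed buckets[k-1] ++ buckets[k], done here structurally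
def pvShift (x : String) : List String → List (List String) → List (List String)
  | _, [] => []
  | prev, b :: bs => (prev.map (fun t => x ++ " " ++ t) ++ b) :: pvShift x b bs

-- one iteration of Source B's 'for x in reversed(qlist)' body
def pvBucketStep (x : String) : List (List String) → List (List String)
  | [] => []
  | b :: bs => (x :: b) :: pvShift x b bs

def get_combos_alt (qlist : List String) (clen : Int) : List String :=
  let clen := if clen == 0 || clen > (qlist.length : Int) then (qlist.length : Int) else clen
  if clen ≤ 0 then []
  else
    let buckets := qlist.foldr pvBucketStep (List.replicate clen.toNat [])
    buckets.flatten

-- ===== PRECONDITION & SPEC =====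
def Spec_get_combos (qlist : List String) (clen : Int) (out : List String) : Prop := out = get_combos_alt qlist clen
instance (qlist : List String) (clen : Int) (out : List String) : Decidable (Spec_get_combos qlist clen out) := by unfold Spec_get_combos; infer_instance

-- ===== CLAIM (what is proved, stated in full; the proofs are below) =====
def Claim_equal_get_combos : Prop := ∀ (qlist : List String) (clen : Int), Dom_get_combos qlist clen → Spec_get_combos qlist clen (get_combos qlist clen)

-- ===== LEMMAS AND PROOFS =====

-- the common intermediate object: buckets of joined combinations, sizes j+1 .. j+m
def pvTableFrom (xs : List String) : Nat → Nat → List (List String)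
  | _, 0 => []
  | j, m + 1 => (pvCombs xs (j + 1)).map (PySem.Str.join " ") :: pvTableFrom xs (j + 1) m

theorem pvFoldl_append_singleton (l : List (List String)) (acc : List String) :
    l.foldl (fun cs comb => cs ++ [PySem.Str.join " " comb]) acc
      = acc ++ l.map (PySem.Str.join " ") := by
  induction l generalizing acc with
  | nil => simp
  | cons y ys ih => simp [ih, List.append_assoc]

theorem pvCombs_length : ∀ (xs : List String) (n : Nat) (l : List String),
    l ∈ pvCombs xs n → l.length = n := by
  intro xs
  induction xs with
  | nil =>
    intro n l hl
    cases n with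
    | zero => simp [pvCombs] at hl; simp [hl]
    | succ m => simp [pvCombs] at hl
  | cons x rest ih =>
    intro n l hl
    cases n with
    | zero => simp [pvCombs] at hl; simp [hl]
    | succ m =>
      simp only [pvCombs, List.mem_append, List.mem_map] at hl
      rcases hl with ⟨l', hl', rfl⟩ | hl
      · simp [ih _ _ hl']
      · exact ih _ _ hl

theorem pvJoin_cons (x : String) (l : List String) (h : l ≠ []) :
    PySem.Str.join " " (x :: l) = x ++ " " ++ PySem.Str.join " " l := by
  obtain ⟨q, rest, rfl⟩ := List.exists_cons_of_ne_nil h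
  rw [← String.toList_inj]
  rw [PySem.Str.toList_join, String.toList_append, String.toList_append,
    PySem.Str.toList_join]
  simp only [List.map_cons]
  rw [PySem.Chars.join_cons_cons]

-- join distributes over the cons-recursion of pvCombs at size ≥ 2
theorem pvJoin_combs_cons (x : String) (xs : List String) (j : Nat) :
    (pvCombs (x :: xs) (j + 2)).map (PySem.Str.join " ")
      = ((pvCombs xs (j + 1)).map (PySem.Str.join " ")).map (fun t => x ++ " " ++ t)
        ++ (pvCombs xs (j + 2)).map (PySem.Str.join " ") := by
  simp only [pvCombs, List.map_append, List.map_map]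
  congr 1
  apply List.map_congr_left
  intro l hl
  have hlen := pvCombs_length xs (j + 1) l hl
  have hne : l ≠ [] := by intro h; rw [h] at hlen; simp at hlen
  simp [Function.comp, pvJoin_cons x l hne]

theorem pvShift_table (x : String) (xs : List String) :
    ∀ (m j : Nat),
      pvShift x ((pvCombs xs (j + 1)).map (PySem.Str.join " ")) (pvTableFrom xs (j + 1) m)
        = pvTableFrom (x :: xs) (j + 1) m := by
  intro m
  induction m with
  | zero => intro j; simp [pvTableFrom, pvShift]
  | succ k ih =>
    intro j
    simp only [pvTableFrom, pvShift, List.cons.injEq]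
    exact ⟨(pvJoin_combs_cons x xs j).symm, ih (j + 1)⟩

theorem pvStep_table (x : String) (xs : List String) (n : Nat) :
    pvBucketStep x (pvTableFrom xs 0 n) = pvTableFrom (x :: xs) 0 n := by
  cases n with
  | zero => rfl
  | succ m =>
    simp only [pvTableFrom, pvBucketStep, List.cons.injEq]
    refine ⟨?_, pvShift_table x xs m 0⟩
    -- size-1 bucket: pvCombs (x::xs) 1 = [x] :: pvCombs xs 1, and join " " [x] = x
    have hx : PySem.Str.join " " [x] = x := by
      rw [← String.toList_inj, PySem.Str.toList_join]
      simp [PySem.Chars.join_singleton]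
    simp [pvCombs, hx]

theorem pvTableFrom_nil : ∀ (m j : Nat), pvTableFrom [] j m = List.replicate m [] := by
  intro m
  induction m with
  | zero => intro j; rfl
  | succ k ih => intro j; simp [pvTableFrom, pvCombs, List.replicate, ih (j + 1)]

theorem pvFoldr_eq_table : ∀ (ys : List String) (n : Nat),
    ys.foldr pvBucketStep (List.replicate n []) = pvTableFrom ys 0 n := by
  intro ys
  induction ys with
  | nil => intro n; simp [pvTableFrom_nil]
  | cons x rest ih =>
    intro n
    simp only [List.foldr, ih n]
    exact pvStep_table x rest n

theorem pvTableFrom_snoc (xs : List String) :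
    ∀ (m j : Nat), pvTableFrom xs j (m + 1)
      = pvTableFrom xs j m ++ [(pvCombs xs (j + m + 1)).map (PySem.Str.join " ")] := by
  intro m
  induction m with
  | zero => intro j; rfl
  | succ k ih =>
    intro j
    show (pvCombs xs (j + 1)).map (PySem.Str.join " ") :: pvTableFrom xs (j + 1) (k + 1) = _
    rw [ih (j + 1)]
    have : j + 1 + k + 1 = j + (k + 1) + 1 := by omega
    simp [pvTableFrom, this]

theorem pvFoldl_eq_flatten (qlist : List String) (m : Nat) :
    (PySem.List.pyRange 1 ((m : Int) + 1) 1).foldl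
      (fun combos N =>
        (pvCombs qlist N.toNat).foldl (fun cs comb => cs ++ [PySem.Str.join " " comb]) combos)
      [] = (pvTableFrom qlist 0 m).flatten := by
  induction m with
  | zero => simp [PySem.List.pyRange_one_eq_nil, pvTableFrom]
  | succ k ih =>
    have hsplit : PySem.List.pyRange 1 ((k : Int) + 1 + 1) 1
        = PySem.List.pyRange 1 ((k : Int) + 1) 1 ++ [(k : Int) + 1] := by
      exact_mod_cast PySem.List.pyRange_one_succ_right (by omega : (1 : Int) ≤ (k : Int) + 1)
    push_cast
    rw [hsplit, List.foldl_append, ih]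
    simp only [List.foldl_cons, List.foldl_nil]
    rw [pvFoldl_append_singleton,
      pvTableFrom_snoc qlist k 0]
    have hN : ((k : Int) + 1).toNat = k + 1 := by omega
    simp [hN]

-- ===== VERDICT (by name: the statement is the Claim_ definition above) =====
theorem get_combos_spec : Claim_equal_get_combos := by
  intro qlist clen _
  show get_combos qlist clen = get_combos_alt qlist clen
  simp only [get_combos, get_combos_alt]
  set c : Int := if clen == 0 || clen > (qlist.length : Int) then (qlist.length : Int) else clen with hc
  by_cases hpos : c ≤ 0
  · have hnil : PySem.List.pyRange 1 (c + 1) 1 = [] :=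
      PySem.List.pyRange_one_eq_nil (by omega)
    rw [hnil, if_pos hpos]
    rfl
  · rw [if_neg hpos, pvFoldr_eq_table qlist c.toNat]
    have : c = ((c.toNat : Int)) := by omega
    rw [this, pvFoldl_eq_flatten qlist c.toNat, Int.toNat_natCast]
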